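-- pv_equiv track=rewrite | github.com/btardio/misc_adwords | parts2keywords.py | rprintb
-- ===== SOURCE A (Python) =====
-- import itertools
--
-- def rprintb ( previous, lst, dct ):
--
--   # create combinations of the first item in the list
--   for item in itertools.combinations ( lst[0], 1 ):
--
--     outstr = ''
--
--     # append the item in the list to previous list
--     # ie: create a list ready for converting to str and printing
--     previous.append ( item )
--
--     # prepare a printable string
--     for a in previous:
--       if a[0] != '<skip>':
--         outstr += '%s ' % a[0]
--     dct [ outstr ] = ''
--
--     # if the length of the list is greater than 1, recur
--     if len ( lst ) > 1:
--       dct.update ( rprintb ( previous, lst[1:], dct ) )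
--
--     # pop the last element of the list in preparation
--     # for the next combination
--     previous.pop()
--
--
--   return dct
-- ===== SOURCE B (Python) =====
-- def rprintb(previous, lst, dct):
--     # Equivalence is about the return value; like A, B fills `dct` in place
--     # (A also temporarily appends to `previous` but restores it).
--     if not lst:
--         return dct
--     # base string contributed by `previous`, computed once
--     base = ''.join(p[0] + ' ' for p in previous if p[0] != '<skip>')
--     # suffix strings of all non-empty prefixes of lst, in A's depth-first
--     # order, built once from the back and shared between branches (DP):
--     # seq(row :: rest) = [tok(x) + s  for x in row  for s in [''] + seq(rest)]
--     seq = []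
--     for row in reversed(lst):
--         toks = [('' if x == '<skip>' else x + ' ') for x in row]
--         seq = [t + s for t in toks for s in [''] + seq]
--     for s in seq:
--         dct[base + s] = ''
--     return dct
-- ===== Notes on version B (the rewrite author's own statement) =====
-- stated objective: alternative
-- what changed: A's recursion rebuilds the key string from the whole `previous` list at every node, threads the dict through recursive calls and does a redundant dict self-update; B computes the base string once, builds the suffix-string list back-to-front over lst (each tail's suffix list computed once and shared between all branches of the level above), and fills the dict in a single insertion pass.
-- outside the precondition, e.g. on rprintb([()], [[]], {'k': 'v'}): A returns {'k': 'v'}, B raises IndexError; on rprintb([()], [['a']], {}): A raises IndexError, B raises IndexError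
-- crash fix: A raises IndexError (from lst[0]) whenever lst is empty; B returns dct unchanged there. — e.g. on rprintb([["a"]], [], [("k", "v")]): A raises IndexError, B returns [("k", "v")]
import Mathlib
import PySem

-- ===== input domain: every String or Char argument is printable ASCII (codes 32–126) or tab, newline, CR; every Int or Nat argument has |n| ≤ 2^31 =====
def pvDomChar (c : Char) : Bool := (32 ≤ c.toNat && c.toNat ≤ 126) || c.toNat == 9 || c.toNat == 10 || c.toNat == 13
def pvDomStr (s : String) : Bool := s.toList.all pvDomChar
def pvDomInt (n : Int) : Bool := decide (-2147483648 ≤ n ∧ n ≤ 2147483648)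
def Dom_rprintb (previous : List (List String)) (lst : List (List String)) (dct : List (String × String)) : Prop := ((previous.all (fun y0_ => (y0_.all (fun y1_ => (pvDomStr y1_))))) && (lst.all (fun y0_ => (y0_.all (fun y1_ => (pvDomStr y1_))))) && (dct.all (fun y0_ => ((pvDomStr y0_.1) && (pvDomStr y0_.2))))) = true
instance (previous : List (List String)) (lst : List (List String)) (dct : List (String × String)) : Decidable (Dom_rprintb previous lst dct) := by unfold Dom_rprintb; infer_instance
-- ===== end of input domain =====

-- B re-implements A as: base string from `previous` computed once + a suffix list built
-- back-to-front over `lst` (shared between branches) + one insertion pass; A's recursion,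
-- which rebuilds the key from the whole `previous` at every node, disappears.
-- Equivalence is about the RETURN value: in Python both A and B fill `dct` in place
-- (A also appends to / pops from `previous`, restoring it before returning).

-- ===== PORT A =====
-- `a[0]` of Python is ported as `a.headD ""`: Pre_ excludes the empty entries of
-- `previous` on which Python raises IndexError, so the default is never consulted.
def rprintbOutstr (previous : List (List String)) : String :=
  previous.foldl (fun o a => if a.headD "" ≠ "<skip>" then o ++ a.headD "" ++ " " else o) ""

mutual
-- `for item in itertools.combinations(lst[0], 1)` iterates the elements of lst[0]
-- in order (1-tuples); Python raises IndexError when lst = [] (excluded by Pre_).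
def rprintb (previous : List (List String)) (lst : List (List String)) (dct : List (String × String)) : List (String × String) :=
  match lst with
  | [] => dct
  | c :: rest => rprintbLoopA previous c rest dct
termination_by (lst.length + 1, 0)

-- the body of A's `for` loop; state = (previous restored each round, dct threaded)
def rprintbLoopA (previous : List (List String)) (c : List String) (rest : List (List String)) (dct : List (String × String)) : List (String × String) :=
  match c with
  | [] => dct
  | x :: xs =>
    let previous2 := previous ++ [[x]]                     -- previous.append(item)
    let outstr := rprintbOutstr previous2                  -- the inner `for a in previous` loop
    let d1 := (PySem.Dict.insert ⟨dct⟩ outstr "").items    -- dct[outstr] = ''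
    let d2 := if 0 < rest.length then                      -- if len(lst) > 1: recur on lst[1:]
        let r := rprintb previous2 rest d1                 -- in Python, r IS dct (same object)
        (PySem.Dict.update ⟨r⟩ r).items                    -- dct.update(r)
      else d1
    rprintbLoopA previous xs rest d2                       -- previous.pop(); next combination
termination_by (rest.length + 1, c.length + 1)
end

-- ===== PORT B =====
def pvTok (x : String) : String := if x = "<skip>" then "" else x ++ " "

def rprintb_alt (previous : List (List String)) (lst : List (List String)) (dct : List (String × String)) : List (String × String) :=
  if lst.isEmpty then dct
  else
    -- base = ''.join(p[0] + ' ' for p in previous if p[0] != '<skip>')   (p[0] as headD, see Pre_)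
    let base := String.join ((previous.filter (fun p => p.headD "" ≠ "<skip>")).map (fun p => p.headD "" ++ " "))
    -- seq built from the back: seq = [t + s for t in toks for s in [''] + seq]
    let seq := lst.foldr (fun row seq =>
        (row.map pvTok).flatMap (fun t => ("" :: seq).map (fun s => t ++ s))) []
    seq.foldl (fun d s => (PySem.Dict.insert ⟨d⟩ (base ++ s) "").items) dct

-- ===== PRECONDITION & SPEC =====
-- Pre_ excludes the inputs where Python A raises IndexError (lst = [] via lst[0], or an
-- empty tuple in `previous` via a[0] once the loop runs); when lst[0] is empty A's loop
-- never runs and A returns dct even with an empty tuple in `previous`, but B evaluates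
-- p[0] up front and raises there, so those inputs are excluded too (see the cites).
-- The Nodup clause only states that `dct` is a real Python dict (an association list
-- with duplicate keys encodes no dict input).
def Pre_rprintb (previous : List (List String)) (lst : List (List String)) (dct : List (String × String)) : Prop :=
  lst ≠ [] ∧ (∀ p ∈ previous, p ≠ []) ∧ (dct.map Prod.fst).Nodup
instance (previous : List (List String)) (lst : List (List String)) (dct : List (String × String)) : Decidable (Pre_rprintb previous lst dct) := by unfold Pre_rprintb; infer_instance

def pvWitness_rprintb : List (List String) × List (List String) × (List (String × String)) :=
  ([["go", "x"], ["<skip>"]], [["a", "<skip>"], ["b"]], [("k", "v")])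

-- A raises IndexError (from lst[0]) whenever lst = []; B returns dct unchanged there
-- (made checkable by Claim_raises_rprintb, proved at the bottom as rprintb_raises).
def Raises_rprintb (previous : List (List String)) (lst : List (List String)) (dct : List (String × String)) : Prop := lst = []
instance (previous : List (List String)) (lst : List (List String)) (dct : List (String × String)) : Decidable (Raises_rprintb previous lst dct) := by unfold Raises_rprintb; infer_instance
def pvRaiseWitness_rprintb : List (List String) × List (List String) × (List (String × String)) :=
  ([["a"]], [], [("k", "v")])
def pvRaiseWitnessOut_rprintb : List (String × String) := [("k", "v")]

def Spec_rprintb (previous : List (List String)) (lst : List (List String)) (dct : List (String × String)) (out : List (String × String)) : Prop := out = rprintb_alt previous lst dct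
instance (previous : List (List String)) (lst : List (List String)) (dct : List (String × String)) (out : List (String × String)) : Decidable (Spec_rprintb previous lst dct out) := by unfold Spec_rprintb; infer_instance

-- ===== CLAIM (what is proved, stated in full; the proofs are below) =====
def Claim_equal_rprintb : Prop := ∀ (previous : List (List String)) (lst : List (List String)) (dct : List (String × String)), Dom_rprintb previous lst dct → Pre_rprintb previous lst dct → Spec_rprintb previous lst dct (rprintb previous lst dct)

def Claim_raises_rprintb : Prop := (∀ (previous : List (List String)) (lst : List (List String)) (dct : List (String × String)), Dom_rprintb previous lst dct → Raises_rprintb previous lst dct → ¬ Pre_rprintb previous lst dct) ∧ (Dom_rprintb (pvRaiseWitness_rprintb.1) (pvRaiseWitness_rprintb.2.1) (pvRaiseWitness_rprintb.2.2) ∧ Raises_rprintb (pvRaiseWitness_rprintb.1) (pvRaiseWitness_rprintb.2.1) (pvRaiseWitness_rprintb.2.2) ∧ rprintb_alt (pvRaiseWitness_rprintb.1) (pvRaiseWitness_rprintb.2.1) (pvRaiseWitness_rprintb.2.2) = pvRaiseWitnessOut_rprintb)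

-- ===== LEMMAS AND PROOFS =====

-- the suffix sequence B builds (named for the proofs; definitionally B's foldr)
def seqB (lst : List (List String)) : List String :=
  lst.foldr (fun row seq => (row.map pvTok).flatMap (fun t => ("" :: seq).map (fun s => t ++ s))) []

theorem foldl_append_str (l : List String) : ∀ (a b : String),
    l.foldl (· ++ ·) (a ++ b) = a ++ l.foldl (· ++ ·) b := by
  induction l with
  | nil => intro a b; rfl
  | cons s l ih => intro a b; simp only [List.foldl_cons, String.append_assoc, ih]

theorem join_cons (s : String) (l : List String) : String.join (s :: l) = s ++ String.join l := by
  show List.foldl (· ++ ·) s l = s ++ List.foldl (· ++ ·) "" l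
  rw [← String.append_empty (s := s), String.append_assoc, foldl_append_str]
  simp

theorem outstr_gen (l : List (List String)) : ∀ (acc : String),
    l.foldl (fun o a => if a.headD "" ≠ "<skip>" then o ++ a.headD "" ++ " " else o) acc
      = acc ++ String.join ((l.filter (fun p => p.headD "" ≠ "<skip>")).map (fun p => p.headD "" ++ " ")) := by
  induction l with
  | nil => intro acc; simp [String.join]
  | cons a l ih =>
    intro acc
    simp only [List.foldl_cons, List.filter_cons]
    rw [ih]
    by_cases h : a.head?.getD "" = "<skip>"
    · simp [h]
    · simp [h, join_cons, String.append_assoc]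

theorem outstr_snoc (previous : List (List String)) (x : String) :
    rprintbOutstr (previous ++ [[x]]) = rprintbOutstr previous ++ pvTok x := by
  unfold rprintbOutstr pvTok
  rw [List.foldl_append]
  by_cases h : x = "<skip>" <;> simp [h, String.append_assoc]

theorem nodup_keys_insert_items (d : List (String × String)) (k v : String)
    (h : (d.map Prod.fst).Nodup) :
    (((PySem.Dict.insert ⟨d⟩ k v).items).map Prod.fst).Nodup := by
  have := PySem.Dict.nodup_keys_insert (⟨d⟩ : PySem.Dict String String) k v (by simpa [PySem.Dict.keys] using h)
  simpa [PySem.Dict.keys] using this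

theorem insert_self_of_get (d : PySem.Dict String String) (k v : String)
    (hn : d.keys.Nodup) (hk : d.get? k = some v) : d.insert k v = d := by
  have hc : d.contains k = true := by
    rw [PySem.Dict.contains_eq_isSome_get?, hk]; rfl
  apply PySem.Dict.ext
  rw [PySem.Dict.items_insert_of_contains d v hc]
  conv_rhs => rw [← List.map_id d.items]
  apply List.map_congr_left
  intro p hp
  by_cases h : p.1 = k
  · have h2 : d.get? p.1 = some p.2 := PySem.Dict.get?_of_mem_items d (by simpa using hp) hn
    rw [h, hk] at h2
    rw [show p = (k, v) from Prod.ext h (Option.some_inj.mp h2).symm]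
    simp
  · simp [h]

theorem update_of_get (ps : List (String × String)) : ∀ (d : PySem.Dict String String),
    d.keys.Nodup → (∀ kv ∈ ps, d.get? kv.1 = some kv.2) → d.update ps = d := by
  induction ps with
  | nil => intro d _ _; rfl
  | cons kv ps ih =>
    intro d hn h
    have hstep : d.insert kv.1 kv.2 = d := insert_self_of_get d kv.1 kv.2 hn (h kv (by simp))
    show (d.insert kv.1 kv.2).update ps = d
    rw [hstep]
    exact ih d hn (fun p hp => h p (by simp [hp]))

theorem update_self (r : List (String × String)) (h : (r.map Prod.fst).Nodup) :
    (PySem.Dict.update (⟨r⟩ : PySem.Dict String String) r).items = r := by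
  have hn : (⟨r⟩ : PySem.Dict String String).keys.Nodup := by simpa [PySem.Dict.keys] using h
  rw [update_of_get r _ hn (fun kv hkv => PySem.Dict.get?_of_mem_items _ (by simpa using hkv) hn)]

-- keys stay Nodup through B's insertion pass
theorem nodup_foldl_insert (seq : List String) (base : String) :
    ∀ (d : List (String × String)), (d.map Prod.fst).Nodup →
    ((seq.foldl (fun d s => (PySem.Dict.insert ⟨d⟩ (base ++ s) "").items) d).map Prod.fst).Nodup := by
  induction seq with
  | nil => intro d h; simpa using h
  | cons s seq ih =>
    intro d h
    exact ih _ (nodup_keys_insert_items d (base ++ s) "" h)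

-- the inner loop of A, characterised against B's one-pass fold (given the IH for `rest`)
theorem loopA_eq (rest : List (List String))
    (IH : ∀ (p : List (List String)) (d : List (String × String)), (d.map Prod.fst).Nodup →
      rprintb p rest d = (seqB rest).foldl (fun d s => (PySem.Dict.insert ⟨d⟩ (rprintbOutstr p ++ s) "").items) d) :
    ∀ (c : List String) (previous : List (List String)) (dct : List (String × String)),
      (dct.map Prod.fst).Nodup →
      rprintbLoopA previous c rest dct
        = (c.flatMap (fun x => pvTok x :: (seqB rest).map (fun s => pvTok x ++ s))).foldl
            (fun d s => (PySem.Dict.insert ⟨d⟩ (rprintbOutstr previous ++ s) "").items) dct := by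
  intro c
  induction c with
  | nil => intro previous dct _; simp [rprintbLoopA]
  | cons x xs ihc =>
    intro previous dct hd
    rw [rprintbLoopA, outstr_snoc]
    have hd1 : ((((PySem.Dict.insert ⟨dct⟩ (rprintbOutstr previous ++ pvTok x) "").items)).map Prod.fst).Nodup :=
      nodup_keys_insert_items dct _ "" hd
    rw [List.flatMap_cons, List.foldl_append, List.foldl_cons, List.foldl_map]
    simp only [← String.append_assoc]
    by_cases hr : 0 < rest.length
    · simp only [if_pos hr]
      have hr_eq := IH (previous ++ [[x]]) _ hd1
      rw [outstr_snoc] at hr_eq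
      rw [hr_eq]
      have hrn := nodup_foldl_insert (seqB rest) (rprintbOutstr previous ++ pvTok x) _ hd1
      rw [update_self _ hrn]
      exact ihc previous _ hrn
    · simp only [if_neg hr]
      have : rest = [] := by
        cases rest with
        | nil => rfl
        | cons a b => exact absurd (by simp) hr
      subst this
      simpa [seqB] using ihc previous _ hd1

theorem main_eq : ∀ (lst : List (List String)) (previous : List (List String)) (dct : List (String × String)),
    (dct.map Prod.fst).Nodup →
    rprintb previous lst dct
      = (seqB lst).foldl (fun d s => (PySem.Dict.insert ⟨d⟩ (rprintbOutstr previous ++ s) "").items) dct := by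
  intro lst
  induction lst with
  | nil => intro p d _; rw [rprintb]; rfl
  | cons c rest ih =>
    intro p d hd
    rw [rprintb]
    rw [loopA_eq rest ih c p d hd]
    congr 1
    show c.flatMap _ = (c.map pvTok).flatMap (fun t => ("" :: seqB rest).map (fun s => t ++ s))
    rw [List.flatMap_map]
    simp [String.append_empty]

-- ===== VERDICT (by name: the statement is the Claim_ definition above) =====
theorem rprintb_spec : Claim_equal_rprintb := by
  intro previous lst dct _ hpre
  unfold Spec_rprintb
  obtain ⟨hl, _, hnd⟩ := hpre
  cases lst with
  | nil => exact absurd rfl hl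
  | cons c rest =>
    rw [main_eq _ _ _ hnd]
    have hbase : rprintbOutstr previous
        = String.join ((previous.filter (fun p => p.headD "" ≠ "<skip>")).map (fun p => p.headD "" ++ " ")) := by
      rw [rprintbOutstr, outstr_gen, String.empty_append]
    simp only [rprintb_alt, List.isEmpty_cons, Bool.false_eq_true, if_false, hbase]
    rfl

@[simp] theorem rprintb_raises : Claim_raises_rprintb := by
  unfold Claim_raises_rprintb
  exact ⟨fun p l d _ hr hp => hp.1 hr, by decide⟩
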